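-- pv_equiv track=rewrite | github.com/Carolay28/min_cuadrados_resuelto | min_cuadrados_resuelto.py | der_parcial_q0
-- ===== SOURCE A (Python) =====
-- def der_parcial_q0(xs, ys):
--     c2 = 0
--     c1 = 0
--     c0 = 0
--     c_ind = 0
--     for xi, yi in zip(xs, ys):
--         c2 += xi**2
--         c1 += xi
--         c0 += 1
--         c_ind += yi
--     return (c2, c1, c0, c_ind)
-- ===== SOURCE B (Python) =====
-- def der_parcial_q0(xs, ys):
--     n = min(len(xs), len(ys))
--
--     def go(lo, hi):
--         if hi - lo == 0:
--             return (0, 0, 0, 0)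
--         if hi - lo == 1:
--             x = xs[lo]
--             return (x * x, x, 1, ys[lo])
--         mid = (lo + hi) // 2
--         a2, a1, a0, ai = go(lo, mid)
--         b2, b1, b0, bi = go(mid, hi)
--         return (a2 + b2, a1 + b1, a0 + b0, ai + bi)
--
--     return go(0, n)
-- ===== Notes on version B (the rewrite author's own statement) =====
-- stated objective: alternative
-- what changed: Replaces the single linear accumulator loop over zipped pairs with an index-based divide-and-conquer recursion that binary-splits the range [0,min(len(xs),len(ys))) and combines the four aggregates componentwise.
import Mathlib
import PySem

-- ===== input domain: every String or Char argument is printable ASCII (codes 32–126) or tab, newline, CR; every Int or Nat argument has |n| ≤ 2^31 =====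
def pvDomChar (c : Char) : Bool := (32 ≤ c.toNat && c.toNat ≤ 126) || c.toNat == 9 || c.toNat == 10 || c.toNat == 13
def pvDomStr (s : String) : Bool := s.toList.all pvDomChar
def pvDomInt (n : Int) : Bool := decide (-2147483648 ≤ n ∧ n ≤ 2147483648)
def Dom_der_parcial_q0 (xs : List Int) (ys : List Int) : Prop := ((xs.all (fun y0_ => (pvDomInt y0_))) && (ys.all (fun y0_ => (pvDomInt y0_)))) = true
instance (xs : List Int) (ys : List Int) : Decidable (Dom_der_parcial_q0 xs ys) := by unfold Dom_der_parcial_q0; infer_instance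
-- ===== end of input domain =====

-- B replaces A's single fused accumulator loop with a divide-and-conquer recursion
-- over the index range, combining the four aggregates componentwise (objective: alternative).

-- ===== PORT A =====
def der_parcial_q0 (xs : List Int) (ys : List Int) : Int × Int × Int × Int :=
  (xs.zip ys).foldl
    (fun st p =>
      match st, p with
      | (c2, c1, c0, cInd), (xi, yi) => (c2 + xi ^ 2, c1 + xi, c0 + 1, cInd + yi))
    (0, 0, 0, 0)

-- ===== PORT B =====
-- go(lo, hi): aggregates over indices [lo, hi), by binary splitting (as in Source B).
-- xs[lo]/ys[lo] are only reached with lo < min-length, so plain in-range indexing (getD).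
-- componentwise combination of the two half-range results (the final return in Source B's go)
def pvCombine (a b : Int × Int × Int × Int) : Int × Int × Int × Int :=
  (a.1 + b.1, a.2.1 + b.2.1, a.2.2.1 + b.2.2.1, a.2.2.2 + b.2.2.2)

def der_parcial_q0_go (xs ys : List Int) (lo hi : Nat) : Int × Int × Int × Int :=
  if hi - lo = 0 then (0, 0, 0, 0)
  else if hi - lo = 1 then
    (xs.getD lo 0 * xs.getD lo 0, xs.getD lo 0, 1, ys.getD lo 0)
  else
    pvCombine (der_parcial_q0_go xs ys lo ((lo + hi) / 2))
      (der_parcial_q0_go xs ys ((lo + hi) / 2) hi)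
termination_by hi - lo
decreasing_by all_goals omega

def der_parcial_q0_alt (xs : List Int) (ys : List Int) : Int × Int × Int × Int :=
  der_parcial_q0_go xs ys 0 (min xs.length ys.length)

-- ===== PRECONDITION & SPEC =====
def Spec_der_parcial_q0 (xs : List Int) (ys : List Int) (out : Int × Int × Int × Int) : Prop := out = der_parcial_q0_alt xs ys
instance (xs : List Int) (ys : List Int) (out : Int × Int × Int × Int) : Decidable (Spec_der_parcial_q0 xs ys out) := by unfold Spec_der_parcial_q0; infer_instance

-- ===== CLAIM (what is proved, stated in full; the proofs are below) =====
def Claim_equal_der_parcial_q0 : Prop := ∀ (xs : List Int) (ys : List Int), Dom_der_parcial_q0 xs ys → Spec_der_parcial_q0 xs ys (der_parcial_q0 xs ys)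

-- ===== LEMMAS AND PROOFS =====

-- the four aggregates of a pair list, as a pure function
def pvAgg (l : List (Int × Int)) : Int × Int × Int × Int :=
  ((l.map (fun p => p.1 * p.1)).sum, (l.map (fun p => p.1)).sum,
   (l.length : Int), (l.map (fun p => p.2)).sum)

lemma pvAgg_append (a b : List (Int × Int)) :
    pvAgg (a ++ b) =
      ((pvAgg a).1 + (pvAgg b).1, (pvAgg a).2.1 + (pvAgg b).2.1,
       (pvAgg a).2.2.1 + (pvAgg b).2.2.1, (pvAgg a).2.2.2 + (pvAgg b).2.2.2) := by
  simp [pvAgg]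

lemma foldl_shift (l : List (Int × Int)) (c2 c1 c0 ci : Int) :
    l.foldl
      (fun st p =>
        match st, p with
        | (a, b, c, d), (xi, yi) => (a + xi ^ 2, b + xi, c + 1, d + yi))
      (c2, c1, c0, ci)
    = (c2 + (pvAgg l).1, c1 + (pvAgg l).2.1, c0 + (pvAgg l).2.2.1, ci + (pvAgg l).2.2.2) := by
  induction l generalizing c2 c1 c0 ci with
  | nil => simp [pvAgg]
  | cons p t ih =>
    obtain ⟨xi, yi⟩ := p
    rw [List.foldl_cons, ih]
    simp only [pvAgg, List.map_cons, List.sum_cons, List.length_cons, Prod.mk.injEq, pow_two]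
    refine ⟨?_, ?_, ?_, ?_⟩ <;> push_cast <;> ring

lemma go_eq_agg (xs ys : List Int) (lo hi : Nat)
    (hle : lo ≤ hi) (hhi : hi ≤ (xs.zip ys).length) :
    der_parcial_q0_go xs ys lo hi = pvAgg (((xs.zip ys).drop lo).take (hi - lo)) := by
  fun_induction der_parcial_q0_go xs ys lo hi with
  | case1 lo hi h0 =>
    simp_all [pvAgg]
  | case2 lo hi h0 h1 =>
    have hlt : lo < (xs.zip ys).length := by omega
    have hx : lo < xs.length := by
      have := List.length_zip (l₁ := xs) (l₂ := ys); omega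
    have hy : lo < ys.length := by
      have := List.length_zip (l₁ := xs) (l₂ := ys); omega
    rw [List.drop_eq_getElem_cons hlt, h1]
    simp [pvAgg, List.getElem_zip, List.getElem?_eq_getElem hx, List.getElem?_eq_getElem hy]
  | case3 lo hi h0 h1 ih1 ih2 =>
    have hsplit :
        ((xs.zip ys).drop lo).take (hi - lo)
          = ((xs.zip ys).drop lo).take ((lo + hi) / 2 - lo)
            ++ ((xs.zip ys).drop ((lo + hi) / 2)).take (hi - (lo + hi) / 2) := by
      have hm : hi - lo = ((lo + hi) / 2 - lo) + (hi - (lo + hi) / 2) := by omega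
      rw [hm, List.take_add, List.drop_drop]
      have h2 : lo + ((lo + hi) / 2 - lo) = (lo + hi) / 2 := by omega
      rw [h2]
    rw [hsplit, pvAgg_append, ih1 (by omega) (by omega), ih2 (by omega) (by omega)]
    simp [pvCombine]

-- ===== VERDICT (by name: the statement is the Claim_ definition above) =====
theorem der_parcial_q0_spec : Claim_equal_der_parcial_q0 := by
  intro xs ys _
  unfold Spec_der_parcial_q0 der_parcial_q0 der_parcial_q0_alt
  rw [foldl_shift, go_eq_agg xs ys 0 (min xs.length ys.length) (by omega) (by simp)]
  have hlen : (xs.zip ys).length ≤ min xs.length ys.length := by simp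
  simp [List.take_of_length_le hlen]
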